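-- pv_equiv track=rewrite | github.com/gregoiremrr/reinforcement_learning_project | riskminer_mcts_3.py | _rpn_stack_size
-- ===== SOURCE A (Python) =====
-- OPERATORS = {
--     'Sign': 1,
--     'Abs': 1,
--     'Log': 1,
--     #'CSRank': 1,   # Placeholder; not implemented below.
--     '+': 2,
--     '-': 2,
--     '*': 2,
--     '/': 2,
--     'Greater': 2,
--     'Less': 2,
--     #'Ref': 2,
--     # Additional operators (Rank, Skew, etc.) can be added later.
-- }
--
-- BEG = "BEG"
--
-- END = "END"
--
-- def _rpn_stack_size(tokens):
--     stack_count = 0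
--     for token in tokens:
--         if token in (BEG, END):
--             continue
--         elif token in OPERATORS:
--             arity = OPERATORS[token]
--             stack_count -= arity
--             if stack_count < 0:
--                 return -1
--             stack_count += 1
--         else:
--             stack_count += 1
--     return stack_count
-- ===== SOURCE B (Python) =====
-- OPERATORS = {
--     'Sign': 1,
--     'Abs': 1,
--     'Log': 1,
--     '+': 2,
--     '-': 2,
--     '*': 2,
--     '/': 2,
--     'Greater': 2,
--     'Less': 2,
-- }
--
-- BEG = "BEG"
--
-- END = "END"
--
-- def _rpn_stack_size(tokens):
--     # Build the depth-profile deltas: each operator becomes a pop step (-arity)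
--     # followed by a push step (+1); each operand a single +1; BEG/END nothing.
--     deltas = []
--     for t in tokens:
--         if t in (BEG, END):
--             continue
--         a = OPERATORS.get(t)
--         if a is None:
--             deltas.append(1)
--         else:
--             deltas.append(-a)
--             deltas.append(1)
--     # Running prefix sums of the profile, starting from 0.
--     prefixes = [0]
--     cur = 0
--     for d in deltas:
--         cur += d
--         prefixes.append(cur)
--     # Underflow anywhere in the profile means invalid; otherwise the final depth.
--     if any(p < 0 for p in prefixes):
--         return -1
--     return cur
-- ===== Notes on version B (the rewrite author's own statement) =====
-- stated objective: alternative
-- what changed: B replaces A's inline accumulate-and-early-return loop by a two-phase pipeline: expand tokens into a list of depth deltas (operator = pop -arity then push +1), take running prefix sums, and return -1 iff any prefix is negative, else the final sum.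
import Mathlib
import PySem

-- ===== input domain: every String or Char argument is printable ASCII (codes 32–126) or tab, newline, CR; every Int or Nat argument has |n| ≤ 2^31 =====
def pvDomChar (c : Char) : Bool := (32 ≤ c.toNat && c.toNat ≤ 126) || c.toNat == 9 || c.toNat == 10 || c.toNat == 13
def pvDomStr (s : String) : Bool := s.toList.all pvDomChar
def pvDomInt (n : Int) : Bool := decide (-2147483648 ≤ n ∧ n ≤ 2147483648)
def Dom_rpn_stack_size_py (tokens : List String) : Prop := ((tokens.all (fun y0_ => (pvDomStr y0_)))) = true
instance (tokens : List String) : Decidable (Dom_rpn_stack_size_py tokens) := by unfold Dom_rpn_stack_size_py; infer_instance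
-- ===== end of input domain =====

-- B restates A's single accumulate-and-early-return loop as a two-phase pipeline
-- (delta profile, then prefix sums inspected for underflow); objective: alternative, same cost.

-- ===== PORT A =====
-- the module-level OPERATORS dict, shared context of both programs
def OPERATORS_py : PySem.Dict String Int :=
  PySem.Dict.mk [("Sign", 1), ("Abs", 1), ("Log", 1), ("+", 2), ("-", 2),
                 ("*", 2), ("/", 2), ("Greater", 2), ("Less", 2)]

-- the for-loop of A with its early `return -1`
def rpnLoopA : List String → Int → Int
  | [], c => c
  | t :: ts, c =>
    if t = "BEG" ∨ t = "END" then rpnLoopA ts c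
    else
      match OPERATORS_py.get? t with
      | some arity => if c - arity < 0 then -1 else rpnLoopA ts (c - arity + 1)
      | none => rpnLoopA ts (c + 1)

def rpn_stack_size_py (tokens : List String) : Int := rpnLoopA tokens 0

-- ===== PORT B =====
-- delta profile of one token: operator = pop (-arity) then push (+1); operand = +1; BEG/END nothing
def rpnDelta (t : String) : List Int :=
  if t = "BEG" ∨ t = "END" then []
  else
    match OPERATORS_py.get? t with
    | some arity => [-arity, 1]
    | none => [1]

def rpn_stack_size_py_alt (tokens : List String) : Int :=
  let deltas := tokens.flatMap rpnDelta
  let pc := deltas.foldl (fun (pc : List Int × Int) d => (pc.1 ++ [pc.2 + d], pc.2 + d)) ([0], 0)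
  if pc.1.any (fun p => p < 0) then -1 else pc.2

-- ===== PRECONDITION & SPEC =====
def Spec_rpn_stack_size_py (tokens : List String) (out : Int) : Prop := out = rpn_stack_size_py_alt tokens
instance (tokens : List String) (out : Int) : Decidable (Spec_rpn_stack_size_py tokens out) := by unfold Spec_rpn_stack_size_py; infer_instance

-- ===== CLAIM (what is proved, stated in full; the proofs are below) =====
def Claim_equal_rpn_stack_size_py : Prop := ∀ (tokens : List String), Dom_rpn_stack_size_py tokens → Spec_rpn_stack_size_py tokens (rpn_stack_size_py tokens)

-- ===== LEMMAS AND PROOFS =====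

-- pure form of B's prefix-sum scan: the successive partial sums starting after c
def rpnScan (c : Int) : List Int → List Int
  | [] => []
  | d :: ds => (c + d) :: rpnScan (c + d) ds

theorem rpnScan_foldl (ds : List Int) : ∀ (ps : List Int) (c : Int),
    ds.foldl (fun (pc : List Int × Int) d => (pc.1 ++ [pc.2 + d], pc.2 + d)) (ps, c)
      = (ps ++ rpnScan c ds, c + ds.sum) := by
  induction ds with
  | nil => simp [rpnScan]
  | cons d ds ih =>
    intro ps c
    simp only [List.foldl_cons, ih, rpnScan, List.sum_cons]
    refine Prod.ext ?_ ?_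
    · simp
    · simp; ring

theorem rpnLoopA_eq (ts : List String) : ∀ (c : Int), 0 ≤ c →
    rpnLoopA ts c =
      if (rpnScan c (ts.flatMap rpnDelta)).any (fun p => p < 0) then -1
      else c + (ts.flatMap rpnDelta).sum := by
  induction ts with
  | nil => intro c _; simp [rpnLoopA, rpnScan]
  | cons t ts ih =>
    intro c hc
    simp only [rpnLoopA, List.flatMap_cons, rpnDelta]
    by_cases hbe : t = "BEG" ∨ t = "END"
    · simp only [if_pos hbe, List.nil_append]
      exact ih c hc
    · simp only [if_neg hbe]
      cases hop : OPERATORS_py.get? t with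
      | some arity =>
        simp only [List.cons_append, List.nil_append, rpnScan, List.any_cons, List.sum_cons]
        by_cases hu : c - arity < 0
        · have hcu : c < arity := by omega
          simp [hcu]
        · have h1 : decide (c + -arity < 0) = false := by simp; omega
          have h2 : decide (c + -arity + 1 < 0) = false := by simp; omega
          have hge : (0 : Int) ≤ c - arity + 1 := by omega
          rw [if_neg hu, ih _ hge, h1, h2]
          have hcc : c + -arity + 1 = c - arity + 1 := by ring
          rw [hcc]
          by_cases hany : (rpnScan (c - arity + 1) (ts.flatMap rpnDelta)).any (fun p => p < 0) = true
          · simp [hany]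
          · simp only [Bool.false_or, hany, if_false]
            ring
      | none =>
        simp only [List.cons_append, List.nil_append, rpnScan, List.any_cons, List.sum_cons]
        have h1 : decide (c + 1 < 0) = false := by simp; omega
        have hge : (0 : Int) ≤ c + 1 := by omega
        rw [ih _ hge, h1]
        by_cases hany : (rpnScan (c + 1) (ts.flatMap rpnDelta)).any (fun p => p < 0) = true
        · simp [hany]
        · simp only [Bool.false_or, hany, if_false]
          ring

-- ===== VERDICT (by name: the statement is the Claim_ definition above) =====
theorem rpn_stack_size_py_spec : Claim_equal_rpn_stack_size_py := by
  intro tokens _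
  unfold Spec_rpn_stack_size_py rpn_stack_size_py rpn_stack_size_py_alt
  simp only [rpnScan_foldl, List.any_append, List.any_cons, List.any_nil]
  rw [rpnLoopA_eq tokens 0 le_rfl]
  norm_num
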